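-- pv_equiv track=rewrite | github.com/ibudiselic/qmk_firmware | keyboards/moonlander/keymaps/ibudiselic/format.py | _parse_keycodes
-- ===== SOURCE A (Python) =====
-- def _parse_keycodes(tokens: list[str]) -> list[str]:
--     at = 0
--     codes = []
--     if tokens[-1] != ',':
--         tokens.append(',')
--     while at < len(tokens):
--         if tokens[at+1] == ',':
--             codes.append(tokens[at])
--             at += 2
--         else:
--             assert tokens[at+1] == '('
--             p = tokens.index(')', at + 1)
--             assert tokens[p+1] == ','
--             codes.append('{}({})'.format(tokens[at], ', '.join(t for t in tokens[at+2:p] if t != ',')))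
--             at = p + 2
--     return codes
-- ===== SOURCE B (Python) =====
-- def _parse_keycodes(tokens: list[str]) -> list[str]:
--     # Single left-to-right state machine: no .index jumps, no slicing.
--     if tokens[-1] != ',':
--         tokens.append(',')
--     codes = []
--     state = 0  # 0: expect head, 1: after head, 2: inside (...), 3: after ')', expect ','
--     head = ''
--     inner = []
--     for tok in tokens:
--         if state == 0:
--             head = tok
--             state = 1
--         elif state == 1:
--             if tok == ',':
--                 codes.append(head)
--                 state = 0
--             else:
--                 assert tok == '('
--                 inner = []
--                 state = 2
--         elif state == 2:
--             if tok == ')':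
--                 codes.append('{}({})'.format(head, ', '.join(inner)))
--                 state = 3
--             elif tok != ',':
--                 inner.append(tok)
--         else:
--             assert tok == ','
--             state = 0
--     assert state == 0
--     return codes
-- ===== Notes on version B (the rewrite author's own statement) =====
-- stated objective: alternative
-- what changed: Replaces A's index-jumping loop (tokens.index(')'), slicing tokens[at+2:p] and a filtered join over the slice) with a single token-by-token finite-state scan that accumulates the head and the inner arguments incrementally.
import Mathlib
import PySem

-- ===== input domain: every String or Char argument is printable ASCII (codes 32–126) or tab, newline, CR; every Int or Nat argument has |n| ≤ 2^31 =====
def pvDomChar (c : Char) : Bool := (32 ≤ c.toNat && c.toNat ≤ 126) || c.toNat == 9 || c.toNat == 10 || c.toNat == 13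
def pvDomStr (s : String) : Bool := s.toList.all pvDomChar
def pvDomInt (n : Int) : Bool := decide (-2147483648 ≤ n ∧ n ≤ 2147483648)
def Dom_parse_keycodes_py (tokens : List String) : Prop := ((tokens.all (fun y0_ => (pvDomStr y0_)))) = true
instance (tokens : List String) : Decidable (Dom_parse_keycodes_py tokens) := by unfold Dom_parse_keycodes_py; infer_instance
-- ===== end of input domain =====

-- B replaces A's index-jump/slice/join parsing with a single finite-state scan (objective: alternative,
-- same cost). Both Pythons mutate `tokens` identically (append a trailing ','); the theorems are about
-- the return value.

-- ===== PORT A =====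
-- Python list.index(v, s): position of the first occurrence of v at index ≥ s (none = ValueError).
def pvIndexFrom (l : List String) (v : String) (s : Nat) : Option Nat :=
  ((l.drop s).findIdx? (fun x => x == v)).map (· + s)

-- the while loop of A; fuel makes it total (each step consumes ≥ 2 tokens, so tokens.length + 1 suffices)
def goA (tokens : List String) (fuel : Nat) (a : Nat) (codes : List String) : List String :=
  match fuel with
  | 0 => codes
  | fuel + 1 =>
    if a < tokens.length then
      match PySem.List.pyGet? tokens ((a : Int) + 1) with
      | none => codes  -- IndexError (outside Pre_)
      | some y =>
        if y = "," then
          goA tokens fuel (a + 2) (codes ++ [(PySem.List.pyGet? tokens (a : Int)).getD ""])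
        else if y = "(" then
          match pvIndexFrom tokens ")" (a + 1) with
          | none => codes  -- ValueError (outside Pre_)
          | some p =>
            match PySem.List.pyGet? tokens ((p : Int) + 1) with
            | none => codes  -- IndexError (outside Pre_)
            | some z =>
              if z = "," then
                goA tokens fuel (p + 2)
                  (codes ++ [(PySem.List.pyGet? tokens (a : Int)).getD "" ++ "(" ++
                    PySem.Str.join ", "
                      ((PySem.List.slice tokens (some ((a : Int) + 2)) (some (p : Int))).filter
                        (fun t => t ≠ ",")) ++ ")"])
              else codes  -- assert failure (outside Pre_)
        else codes  -- assert failure (outside Pre_)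
    else codes

def parse_keycodes_py (tokens : List String) : List String :=
  match PySem.List.pyGet? tokens (-1) with
  | none => []  -- IndexError on empty input (outside Pre_)
  | some t =>
    let toks := if t ≠ "," then tokens ++ [","] else tokens
    goA toks (toks.length + 1) 0 []

-- ===== PORT B =====
-- B's for-loop over the tokens: state 0 = expect head, 1 = after head, 2 = inside (...), 3 = after ')'
def goB (toks : List String) (state : Nat) (head : String) (inner : List String)
    (codes : List String) : List String :=
  match toks with
  | [] => if state = 0 then codes else []  -- assert state == 0 (outside Pre_)
  | tok :: rest =>
    if state = 0 then goB rest 1 tok inner codes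
    else if state = 1 then
      if tok = "," then goB rest 0 head inner (codes ++ [head])
      else if tok = "(" then goB rest 2 head [] codes
      else []  -- assert tok == '(' (outside Pre_)
    else if state = 2 then
      if tok = ")" then
        goB rest 3 head inner (codes ++ [head ++ "(" ++ PySem.Str.join ", " inner ++ ")"])
      else if tok ≠ "," then goB rest 2 head (inner ++ [tok]) codes
      else goB rest 2 head inner codes
    else if tok = "," then goB rest 0 head inner codes
    else []  -- assert tok == ',' (outside Pre_)

def parse_keycodes_py_alt (tokens : List String) : List String :=
  match PySem.List.pyGet? tokens (-1) with
  | none => []  -- same IndexError on empty input (outside Pre_)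
  | some t =>
    let toks := if t ≠ "," then tokens ++ [","] else tokens
    goB toks 0 "" [] []

-- ===== PRECONDITION & SPEC =====
-- the grammar of token streams A parses without raising, as a four-state automaton over the
-- tokens: a sequence of items 'HEAD ,' or 'HEAD ( inner… ) ,' where the ')' closing a group is
-- the FIRST ')' after its '('  (state 0 = expecting a head, 1 = after a head, 2 = inside a
-- group, 3 = after a ')'; accept iff the stream ends in state 0)
def pvWfS : List String → Nat → Bool
  | [], s => s == 0
  | tok :: rest, s =>
    if s = 0 then pvWfS rest 1
    else if s = 1 then
      if tok = "," then pvWfS rest 0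
      else if tok = "(" then pvWfS rest 2
      else false
    else if s = 2 then
      if tok = ")" then pvWfS rest 3 else pvWfS rest 2
    else
      if tok = "," then pvWfS rest 0 else false

-- Pre_ excludes exactly the inputs on which A raises (IndexError on the empty list, and
-- ValueError / AssertionError / IndexError on token streams outside the grammar above).
def Pre_parse_keycodes_py (tokens : List String) : Prop :=
  tokens ≠ [] ∧
    pvWfS (if tokens.getLast? = some "," then tokens else tokens ++ [","]) 0 = true
instance (tokens : List String) : Decidable (Pre_parse_keycodes_py tokens) := by
  unfold Pre_parse_keycodes_py; infer_instance

def pvWitness_parse_keycodes_py : List String :=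
  ["KC_A", ",", "LT", "(", "1", ",", "KC_B", ")"]

def Spec_parse_keycodes_py (tokens : List String) (out : List String) : Prop :=
  out = parse_keycodes_py_alt tokens
instance (tokens : List String) (out : List String) : Decidable (Spec_parse_keycodes_py tokens out) := by
  unfold Spec_parse_keycodes_py; infer_instance

-- ===== CLAIM (what is proved, stated in full; the proofs are below) =====
def Claim_equal_parse_keycodes_py : Prop :=
  ∀ (tokens : List String), Dom_parse_keycodes_py tokens → Pre_parse_keycodes_py tokens →
    Spec_parse_keycodes_py tokens (parse_keycodes_py tokens)

-- ===== LEMMAS AND PROOFS =====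

-- splits a token list at the FIRST ")" (the part before it, the part after it)
def pvSplitParen : List String → Option (List String × List String)
  | [] => none
  | x :: xs =>
    if x = ")" then some ([], xs)
    else (pvSplitParen xs).map (fun pq => (x :: pq.1, pq.2))

-- used by pvWf's termination proof, so it stays above it
theorem pvSplitParen_some : ∀ (xs pre post : List String),
    pvSplitParen xs = some (pre, post) → xs = pre ++ ")" :: post ∧ ")" ∉ pre := by
  intro xs
  induction xs with
  | nil => intro pre post h; simp [pvSplitParen] at h
  | cons x xs ih =>
    intro pre post h
    by_cases hx : x = ")"
    · subst hx
      simp [pvSplitParen] at h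
      constructor
      · simp [h.1, h.2]
      · simp [h.1]
    · simp [pvSplitParen, hx] at h
      obtain ⟨p', hpq, h1⟩ := h
      obtain ⟨hxs, hnm⟩ := ih p' post hpq
      subst h1
      constructor
      · simp [hxs]
      · simp [hnm]; exact fun he => hx he.symm

-- the grammar of token streams A parses without raising: a sequence of items
-- 'HEAD ,' or 'HEAD ( inner… ) ,' where the ')' is the first ')' after the '('
def pvWf : List String → Bool
  | [] => true
  | [_] => false
  | _ :: y :: rest =>
    if y = "," then pvWf rest
    else if y = "(" then
      match h : pvSplitParen rest with
      | some (_, "," :: post') => pvWf post'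
      | _ => false
    else false
  termination_by l => l.length
  decreasing_by
    · simp
    · have := (pvSplitParen_some _ _ _ h).1
      subst this
      simp
      omega


theorem pvSplitParen_none (l : List String) : pvSplitParen l = none → ")" ∉ l := by
  induction l with
  | nil => simp
  | cons x xs ih =>
    intro h
    by_cases hx : x = ")"
    · simp [pvSplitParen, hx] at h
    · simp [pvSplitParen, hx] at h
      intro hm
      rcases List.mem_cons.mp hm with h1 | h2
      · exact hx h1.symm
      · exact ih h h2

theorem pvWfS_state2 (pre : List String) : ∀ (post : List String), ")" ∉ pre →
    pvWfS (pre ++ ")" :: post) 2 = pvWfS post 3 := by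
  induction pre with
  | nil => intro post _; simp [pvWfS]
  | cons a pre ih =>
    intro post hnp
    have ha : ¬ (a = ")") := by intro h; exact hnp (by simp [h])
    have hnp' : ")" ∉ pre := by intro h; exact hnp (by simp [h])
    simp [pvWfS, ha, ih post hnp']

theorem pvWfS_state2_none (l : List String) : ")" ∉ l → pvWfS l 2 = false := by
  induction l with
  | nil => intro _; simp [pvWfS]
  | cons a rest ih =>
    intro hnp
    have ha : ¬ (a = ")") := by intro h; exact hnp (by simp [h])
    have hnp' : ")" ∉ rest := by intro h; exact hnp (by simp [h])
    simp [pvWfS, ha, ih hnp']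

theorem pvWf_eq_pvWfS (n : Nat) : ∀ (l : List String), l.length ≤ n →
    pvWf l = pvWfS l 0 := by
  induction n with
  | zero =>
    intro l hl
    have : l = [] := List.length_eq_zero_iff.mp (Nat.le_zero.mp hl)
    subst this
    simp [pvWf, pvWfS]
  | succ n ih =>
    intro l hl
    match l with
    | [] => simp [pvWf, pvWfS]
    | [x] => simp [pvWf, pvWfS]
    | x :: y :: rest =>
      have hR : pvWfS (x :: y :: rest) 0 = pvWfS (y :: rest) 1 := by simp [pvWfS]
      rw [hR]
      by_cases hy : y = ","
      · subst hy
        rw [pvWf, if_pos rfl]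
        rw [show pvWfS ("," :: rest) 1 = pvWfS rest 0 by simp [pvWfS]]
        exact ih rest (by simp at hl; omega)
      · by_cases hp : y = "("
        · subst hp
          rw [pvWf, if_neg (by decide), if_pos rfl]
          rw [show pvWfS ("(" :: rest) 1 = pvWfS rest 2 by simp [pvWfS]]
          cases hsp : pvSplitParen rest with
          | none =>
            rw [pvWfS_state2_none rest (pvSplitParen_none rest hsp)]
          | some pq =>
            obtain ⟨pre, post⟩ := pq
            obtain ⟨hrest, hnp⟩ := pvSplitParen_some _ _ _ hsp
            subst hrest
            rw [pvWfS_state2 pre post hnp]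
            split
            · next pre' tail heq =>
              simp only [Option.some.injEq, Prod.mk.injEq] at heq
              obtain ⟨-, hpost⟩ := heq
              subst hpost
              rw [show pvWfS ("," :: tail) 3 = pvWfS tail 0 by simp [pvWfS]]
              exact ih tail (by simp at hl; omega)
            · next hnone =>
              match post with
              | [] => simp [pvWfS]
              | t :: post' =>
                by_cases ht : t = ","
                · subst ht
                  exact absurd rfl (hnone pre post')
                · simp [pvWfS, ht]
        · rw [pvWf, if_neg hy, if_neg hp]
          rw [show pvWfS (y :: rest) 1 = false by simp [pvWfS, hy, hp]]

theorem goB_state2 (pre : List String) : ∀ (post : List String) (head : String)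
    (inner codes : List String), ")" ∉ pre →
    goB (pre ++ ")" :: post) 2 head inner codes
      = goB post 3 head (inner ++ pre.filter (fun t => t ≠ ","))
          (codes ++ [head ++ "(" ++
            PySem.Str.join ", " (inner ++ pre.filter (fun t => t ≠ ",")) ++ ")"]) := by
  induction pre with
  | nil => intro post head inner codes _; simp [goB]
  | cons a pre ih =>
    intro post head inner codes hnp
    have ha : ¬ (a = ")") := by intro h; exact hnp (by simp [h])
    have hnp' : ")" ∉ pre := by intro h; exact hnp (by simp [h])
    by_cases hc : a = ","
    · subst hc
      simp only [List.cons_append, goB, reduceIte]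
      rw [ih post head inner codes hnp']
      simp
    · simp only [List.cons_append, goB, ha, hc, ite_false, ne_eq,
        not_false_eq_true, ite_true]
      rw [ih post head (inner ++ [a]) codes hnp']
      simp [hc]

theorem pvFindIdx_split (pre : List String) : ∀ (post : List String), ")" ∉ pre →
    (pre ++ ")" :: post).findIdx? (fun x => x == ")") = some pre.length := by
  induction pre with
  | nil => intro post _; simp [List.findIdx?_cons]
  | cons a pre ih =>
    intro post hnp
    have ha : ¬ (a = ")") := by intro h; exact hnp (by simp [h])
    have hnp' : ")" ∉ pre := by intro h; exact hnp (by simp [h])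
    simp [List.findIdx?_cons, ha, ih post hnp']

theorem goA_eq_goB (n : Nat) : ∀ (suf tokens : List String) (a fuel : Nat)
    (codes : List String) (head : String) (inner : List String),
    suf.length ≤ n → tokens.drop a = suf → pvWf suf = true → suf.length < fuel →
    goA tokens fuel a codes = goB suf 0 head inner codes := by
  induction n with
  | zero =>
    intro suf tokens a fuel codes head inner hlen hdrop _ hfuel
    have hs : suf = [] := List.length_eq_zero_iff.mp (Nat.le_zero.mp hlen)
    subst hs
    have ha : tokens.length ≤ a := by
      have := congrArg List.length hdrop
      simp at this; omega
    match fuel, hfuel with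
    | fuel + 1, _ => simp [goA, goB, Nat.not_lt.mpr ha]
  | succ n ih =>
    intro suf tokens a fuel codes head inner hlen hdrop hwf hfuel
    match suf, hwf with
    | [], _ =>
      have ha : tokens.length ≤ a := by
        have := congrArg List.length hdrop
        simp at this; omega
      match fuel, hfuel with
      | fuel + 1, _ => simp [goA, goB, Nat.not_lt.mpr ha]
    | [x], hwf => simp [pvWf] at hwf
    | x :: y :: rest, hwf =>
      have hlentok : tokens.length - a = rest.length + 2 := by
        have := congrArg List.length hdrop
        simp at this; omega
      have halt : a < tokens.length := by omega
      have hx : PySem.List.pyGet? tokens (a : Int) = some x := by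
        rw [PySem.List.pyGet?_natCast]
        have h0 : tokens[a]? = (tokens.drop a)[0]? := by rw [List.getElem?_drop]; simp
        rw [h0, hdrop]; rfl
      have hy : PySem.List.pyGet? tokens ((a : Int) + 1) = some y := by
        rw [show ((a : Int) + 1) = ((a + 1 : Nat) : Int) by push_cast; ring,
          PySem.List.pyGet?_natCast]
        have h1 : tokens[a + 1]? = (tokens.drop a)[1]? := by rw [List.getElem?_drop]
        rw [h1, hdrop]; rfl
      match fuel, hfuel with
      | fuel + 1, hfuel =>
        by_cases hcy : y = ","
        · -- simple item:  x ,
          subst hcy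
          have hwf' : pvWf rest = true := by simpa [pvWf] using hwf
          have hdrop' : tokens.drop (a + 2) = rest := by
            rw [← List.drop_drop, hdrop]; rfl
          rw [goA]
          simp only [if_pos halt, hy, reduceIte, hx, Option.getD_some]
          rw [ih rest tokens (a + 2) fuel (codes ++ [x]) x inner
            (by simp at hlen; omega) hdrop' hwf' (by simp at hfuel; omega)]
          simp [goB]
        · -- grouped item:  x ( … ) ,
          have hcy' : y = "(" := by
            by_contra hne
            simp [pvWf, hcy, hne] at hwf
          subst hcy'
          have hsplit : ∃ pre post', pvSplitParen rest = some (pre, "," :: post') ∧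
              pvWf post' = true := by
            rw [pvWf] at hwf
            rw [if_neg (by decide), if_pos rfl] at hwf
            split at hwf
            · next pre tail h => exact ⟨pre, _, h, hwf⟩
            · exact absurd hwf (by simp)
          obtain ⟨pre, post', hsp, hwf'⟩ := hsplit
          obtain ⟨hrest, hnp⟩ := pvSplitParen_some _ _ _ hsp
          subst hrest
          have hdrop1 : tokens.drop (a + 1) = "(" :: (pre ++ ")" :: "," :: post') := by
            rw [← List.drop_drop, hdrop]; rfl
          have hidx : pvIndexFrom tokens ")" (a + 1) = some (a + 2 + pre.length) := by
            unfold pvIndexFrom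
            rw [hdrop1, List.findIdx?_cons]
            rw [if_neg (by decide)]
            rw [pvFindIdx_split pre ("," :: post') hnp]
            simp; omega
          have htok : tokens = (tokens.take a ++ x :: "(" :: pre ++ [")"]) ++ "," :: post' := by
            conv_lhs => rw [← List.take_append_drop a tokens, hdrop]
            simp
          have hplen : (tokens.take a ++ x :: "(" :: pre ++ [")"]).length
              = a + 2 + pre.length + 1 := by
            simp [List.length_take]
            omega
          have hz : PySem.List.pyGet? tokens (((a + 2 + pre.length : Nat) : Int) + 1)
              = some "," := by
            conv_lhs => rw [htok]
            rw [show (((a + 2 + pre.length : Nat) : Int) + 1)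
                = ((tokens.take a ++ x :: "(" :: pre ++ [")"]).length : Int) by
              rw [hplen]; push_cast; ring]
            exact PySem.List.pyGet?_append_length _ _ _
          have hslice : PySem.List.slice tokens (some ((a : Int) + 2))
              (some ((a + 2 + pre.length : Nat) : Int)) = pre := by
            rw [show ((a : Int) + 2) = ((a + 2 : Nat) : Int) by push_cast; ring,
              PySem.List.slice_natCast]
            have hdrop2 : tokens.drop (a + 2) = pre ++ ")" :: "," :: post' := by
              rw [← List.drop_drop, hdrop]; rfl
            rw [hdrop2, show a + 2 + pre.length - (a + 2) = pre.length by omega]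
            simp
          have hdropP : tokens.drop (a + 2 + pre.length + 2) = post' := by
            rw [show a + 2 + pre.length + 2 = a + (pre.length + 4) by omega,
              ← List.drop_drop, hdrop]
            rw [show x :: "(" :: (pre ++ ")" :: "," :: post')
                = (x :: "(" :: pre ++ [")", ","]) ++ post' by simp]
            rw [List.drop_left' (by simp)]
          rw [goA]
          simp only [if_pos halt, hy, reduceIte, hidx, hz, hx, Option.getD_some, hslice]
          rw [ih post' tokens (a + 2 + pre.length + 2) fuel
            (codes ++ [x ++ "(" ++
              PySem.Str.join ", " (pre.filter (fun t => t ≠ ",")) ++ ")"])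
            x (pre.filter (fun t => t ≠ ","))
            (by simp at hlen; omega) hdropP hwf' (by simp at hfuel; omega)]
          -- B side
          rw [show x :: "(" :: (pre ++ ")" :: "," :: post')
              = x :: "(" :: (pre ++ ")" :: ("," :: post')) by simp]
          rw [goB]
          simp only [reduceIte]
          rw [goB]
          simp only [reduceIte]
          rw [goB_state2 pre ("," :: post') x [] codes hnp]
          rw [goB]
          simp only [reduceIte]
          simp

theorem parse_keycodes_py_spec : Claim_equal_parse_keycodes_py := by
  intro tokens _ hpre
  obtain ⟨hne, hwf⟩ := hpre
  unfold Spec_parse_keycodes_py parse_keycodes_py parse_keycodes_py_alt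
  obtain ⟨t, ht⟩ : ∃ t, tokens.getLast? = some t := by
    cases h : tokens.getLast? with
    | none => exact absurd (List.getLast?_eq_none_iff.mp h) hne
    | some t => exact ⟨t, rfl⟩
  simp only [PySem.List.pyGet?_neg_one, ht]
  rw [ht] at hwf
  by_cases hc : t = ","
  · subst hc
    have hwf' : pvWf tokens = true := by
      rw [pvWf_eq_pvWfS tokens.length tokens le_rfl]
      simpa using hwf
    simp only [if_neg (show ¬((",":String) ≠ ",") by decide)]
    exact goA_eq_goB tokens.length tokens tokens 0 (tokens.length + 1) [] "" []
      le_rfl (by simp) hwf' (by omega)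
  · have hwf' : pvWf (tokens ++ [","]) = true := by
      rw [pvWf_eq_pvWfS (tokens ++ [","]).length (tokens ++ [","]) le_rfl]
      simpa [hc] using hwf
    simp only [if_pos (show (t ≠ ",") from hc)]
    exact goA_eq_goB (tokens ++ [","]).length (tokens ++ [","]) (tokens ++ [","]) 0
      ((tokens ++ [","]).length + 1) [] "" [] le_rfl (by simp) hwf' (by omega)
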